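-- pv_equiv track=rewrite | github.com/zn09224/Problem-Solving-in-Python | Implementing Searching Algorithms/Question2.py | binary_search_iterative_modified
-- ===== SOURCE A (Python) =====
-- def binary_search_iterative_modified(lst,item):
--     l = 0
--     h = len(lst) - 1
--     found = None
--
--     while l <= h:
--
--         m = (l + h)//2
--
--         if lst[m] == item:
--             found = m
--             break
--
--         elif item < lst[m]:
--             h = m-1
--
--         elif item > lst[m]:
--             l = m+1
--
--     if found == None:
--
--         if l > h:
--             lst.insert(l, item)
--             return l
--
--     return found
-- ===== SOURCE B (Python) =====
-- def binary_search_iterative_modified(lst, item):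
--     def go(lo, hi):
--         if lo > hi:
--             lst.insert(lo, item)
--             return lo
--         m = (lo + hi) // 2
--         if lst[m] == item:
--             return m
--         if item < lst[m]:
--             return go(lo, m - 1)
--         return go(m + 1, hi)
--     return go(0, len(lst) - 1)
-- ===== Notes on version B (the rewrite author's own statement) =====
-- stated objective: alternative
-- what changed: The iterative while-loop with a 'found' sentinel and post-loop insertion check is replaced by a recursive divide-and-conquer helper on (lo, hi) whose base case lo > hi performs the insertion; identical midpoint sequence, so identical found index and insertion point. Both A and B mutate lst in place when the item is absent; the proved equivalence is about the return value.
import Mathlib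
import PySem

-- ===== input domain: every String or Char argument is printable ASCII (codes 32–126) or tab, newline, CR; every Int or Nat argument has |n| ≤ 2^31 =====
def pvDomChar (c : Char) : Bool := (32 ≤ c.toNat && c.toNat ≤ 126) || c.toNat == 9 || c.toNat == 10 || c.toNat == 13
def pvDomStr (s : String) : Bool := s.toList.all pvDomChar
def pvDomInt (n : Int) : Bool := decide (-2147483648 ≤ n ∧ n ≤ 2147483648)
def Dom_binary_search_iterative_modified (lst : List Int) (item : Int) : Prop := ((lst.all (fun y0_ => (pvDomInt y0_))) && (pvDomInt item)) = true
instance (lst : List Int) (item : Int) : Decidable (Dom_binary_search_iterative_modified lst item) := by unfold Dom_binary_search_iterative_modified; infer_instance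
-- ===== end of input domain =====

-- B rewrites A's while-loop (with a 'found' sentinel and a post-loop check) as a recursive
-- divide-and-conquer on bounds; same midpoint sequence, hence the same return value.
-- Both Pythons mutate lst in place when the item is absent; the equivalence proved here is
-- about the RETURN value only (the mutation is identical in both and not modelled).
-- Each loop/recursion runs at most lst.length + 1 steps, so fuel = lst.length + 1 is a
-- totality guard only, never exhausted on a real call.

-- ===== PORT A =====
-- the while-loop: state (l, h, found); returns the state at exit (break sets found)
def pvALoop (lst : List Int) (item : Int) : Nat → Int → Int → Option Int → Int × Int × Option Int
  | 0, l, h, found => (l, h, found)        -- fuel guard, unreachable with the wrapper's fuel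
  | fuel + 1, l, h, found =>
    if l ≤ h then
      let m := PySem.Int.floordiv (l + h) 2
      match PySem.List.pyGet? lst m with
      | none => (l, h, found)              -- IndexError, unreachable for the loop's index range
      | some v =>
        if v == item then (l, h, some m)   -- found = m; break
        else if item < v then pvALoop lst item fuel l (m - 1) found
        else pvALoop lst item fuel (m + 1) h found   -- 'elif item > lst[m]' is forced by trichotomy
    else (l, h, found)

def binary_search_iterative_modified (lst : List Int) (item : Int) : Int :=
  match pvALoop lst item (lst.length + 1) 0 ((lst.length : Int) - 1) none with
  | (_, _, some m) => m
  | (l, h, none) =>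
      if l > h then l else 0   -- the 'else' would return Python None; unreachable after the loop
      -- (the in-place lst.insert(l, item) before 'return l' is a side effect, not modelled)

-- ===== PORT B =====
def pvBGo (lst : List Int) (item : Int) : Nat → Int → Int → Int
  | 0, lo, hi => if lo > hi then lo else 0   -- fuel guard, unreachable with the wrapper's fuel
  | fuel + 1, lo, hi =>
    if lo > hi then lo   -- Python here does lst.insert(lo, item) and returns lo
    else
      let m := PySem.Int.floordiv (lo + hi) 2
      match PySem.List.pyGet? lst m with
      | none => 0   -- IndexError, unreachable for the recursion's index range
      | some v =>
        if v == item then m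
        else if item < v then pvBGo lst item fuel lo (m - 1)
        else pvBGo lst item fuel (m + 1) hi

def binary_search_iterative_modified_alt (lst : List Int) (item : Int) : Int :=
  pvBGo lst item (lst.length + 1) 0 ((lst.length : Int) - 1)

-- ===== PRECONDITION & SPEC =====
def Spec_binary_search_iterative_modified (lst : List Int) (item : Int) (out : Int) : Prop := out = binary_search_iterative_modified_alt lst item
instance (lst : List Int) (item : Int) (out : Int) : Decidable (Spec_binary_search_iterative_modified lst item out) := by unfold Spec_binary_search_iterative_modified; infer_instance

-- ===== CLAIM (what is proved, stated in full; the proofs are below) =====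
def Claim_equal_binary_search_iterative_modified : Prop := ∀ (lst : List Int) (item : Int), Dom_binary_search_iterative_modified lst item → Spec_binary_search_iterative_modified lst item (binary_search_iterative_modified lst item)

-- ===== LEMMAS AND PROOFS =====

-- reading A's exit state the way the Python epilogue does equals B's recursion, at every fuel
theorem pvALoop_eq_pvBGo (lst : List Int) (item : Int) (fuel : Nat) (l h : Int) :
    (match pvALoop lst item fuel l h none with
     | (_, _, some m) => m
     | (l', h', none) => if l' > h' then l' else 0) = pvBGo lst item fuel l h := by
  induction fuel generalizing l h with
  | zero => simp [pvALoop, pvBGo]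
  | succ fuel ih =>
    rw [pvALoop, pvBGo]
    by_cases hlh : l ≤ h
    · simp only [hlh, if_true, gt_iff_lt, not_lt.mpr hlh, if_false]
      rcases hget : PySem.List.pyGet? lst (PySem.Int.floordiv (l + h) 2) with _ | v
      · simp [not_lt.mpr hlh]
      · by_cases heq : v == item
        · simp [heq]
        · by_cases hlt : item < v <;> simp [heq, hlt, ih]
    · simp [hlh, not_le.mp hlh]

-- ===== VERDICT (by name: the statement is the Claim_ definition above) =====
theorem binary_search_iterative_modified_spec : Claim_equal_binary_search_iterative_modified := by
  intro lst item _
  unfold Spec_binary_search_iterative_modified binary_search_iterative_modified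
    binary_search_iterative_modified_alt
  exact pvALoop_eq_pvBGo lst item (lst.length + 1) 0 ((lst.length : Int) - 1)
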